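-- pv_equiv track=rewrite | github.com/hicann/ops-math | scripts/opsuite/utils/tensor_dump.py | _format_by_shape
-- ===== SOURCE A (Python) =====
-- def _format_by_shape(values, shape):
--     shape = list(shape)
--     ndim = len(shape)
--     total = len(values)
--     if total == 0:
--         return ""
--
--     for i in range(ndim - 2, -1, -1):
--         shape[i] *= shape[i + 1]
--
--     content = "[" * ndim
--     for i in range(total):
--         cnt = 0
--         for s in shape:
--             if (i + 1) % s == 0:
--                 cnt += 1
--         content += str(values[i])
--         if cnt:
--             content += "]" * cnt
--             if i != total - 1:
--                 content += ",\n" + "[" * cnt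
--         elif i != total - 1:
--             content += ","
--     return content
-- ===== SOURCE B (Python) =====
-- def _format_by_shape(values, shape):
--     total = len(values)
--     if total == 0:
--         return ""
--     # odometer digits, innermost dimension first; rollover count replaces per-index modular scans
--     digits = [abs(s) for s in reversed(shape)]
--     counters = [0] * len(digits)
--     parts = ["[" * len(digits)]
--     last = total - 1
--     for i in range(total):
--         parts.append(str(values[i]))
--         cnt = 0
--         for j in range(len(digits)):
--             counters[j] += 1
--             if counters[j] == digits[j]:
--                 counters[j] = 0
--                 cnt += 1
--             else:
--                 break
--         if i == last:
--             parts.append("]" * cnt)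
--         elif cnt:
--             parts.append("]" * cnt + ",\n" + "[" * cnt)
--         else:
--             parts.append(",")
--     return "".join(parts)
-- ===== Notes on version B (the rewrite author's own statement) =====
-- stated objective: faster
-- what changed: A precomputes the suffix products in place and, for every element, scans all of them with a modulo test to count closing brackets, accumulating the output by string concatenation; B instead keeps an odometer of per-dimension counters and counts rollovers of one increment-with-carry step per element (no modulo, no products), collecting the pieces in a list joined once at the end.
import Mathlib
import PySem

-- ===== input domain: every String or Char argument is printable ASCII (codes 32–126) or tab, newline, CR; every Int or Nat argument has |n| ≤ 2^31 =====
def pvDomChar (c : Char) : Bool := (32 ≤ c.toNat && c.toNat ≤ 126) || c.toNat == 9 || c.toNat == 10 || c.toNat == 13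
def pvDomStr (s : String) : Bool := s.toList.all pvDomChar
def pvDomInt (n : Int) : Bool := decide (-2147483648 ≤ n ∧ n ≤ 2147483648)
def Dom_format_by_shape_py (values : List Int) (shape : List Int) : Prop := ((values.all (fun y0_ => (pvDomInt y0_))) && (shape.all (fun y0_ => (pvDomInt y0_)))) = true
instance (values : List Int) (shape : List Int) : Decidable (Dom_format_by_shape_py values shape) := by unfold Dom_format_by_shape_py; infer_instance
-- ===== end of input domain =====

-- B replaces A's per-element scan over the suffix products (one modulo per dimension per element)
-- by an odometer of per-dimension counters whose rollover count gives the bracket depth, and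
-- collects the pieces in a list joined once at the end; proved equal to A on Pre_ (no 0 in shape).

-- ===== PORT A =====
-- literal port of _format_by_shape; cnt is an Int as in Python ('if cnt:' is cnt ≠ 0);
-- "[" * ndim: ndim = len(shape) ≥ 0 and cnt ≥ 0 where used, so .toNat is exact
def format_by_shape_py (values : List Int) (shape : List Int) : String :=
  let ndim : Int := PySem.List.len shape
  let total : Int := PySem.List.len values
  if total == 0 then ""
  else
    let shape := (PySem.List.pyRange (ndim - 2) (-1) (-1)).foldl
        (fun s i => PySem.List.pySetD s i (PySem.List.pyGetD s i 0 * PySem.List.pyGetD s (i + 1) 0)) shape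
    (PySem.List.pyRange 0 total 1).foldl
      (fun content i =>
        let cnt : Int := shape.foldl (fun c s => if PySem.Int.mod (i + 1) s == 0 then c + 1 else c) 0
        let content := content ++ PySem.Int.toStr (PySem.List.pyGetD values i 0)
        if cnt ≠ 0 then
          let content := content ++ String.ofList (List.replicate cnt.toNat ']')
          if i != total - 1 then content ++ ",\n" ++ String.ofList (List.replicate cnt.toNat '[') else content
        else
          if i != total - 1 then content ++ "," else content)
      (String.ofList (List.replicate ndim.toNat '['))

-- ===== PORT B =====
-- the inner 'increment with carry, break when a digit does not roll over' loop of Source B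
def pvCarry (digits : List Int) (counters : List Int) : List Int × Int :=
  match digits, counters with
  | _, [] => ([], 0)
  | [], cs => (cs, 0)
  | d :: ds, c :: cs =>
      if c + 1 == d then
        let r := pvCarry ds cs
        (0 :: r.1, r.2 + 1)
      else ((c + 1) :: cs, 0)

-- literal port of Source B (cnt ≥ 0 where used, so .toNat is exact)
def format_by_shape_py_alt (values : List Int) (shape : List Int) : String :=
  let total : Int := PySem.List.len values
  if total == 0 then ""
  else
    let digits := shape.reverse.map (fun s => |s|)
    let last := total - 1
    let res := (PySem.List.pyRange 0 total 1).foldl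
      (fun st i =>
        let parts := st.2 ++ [PySem.Int.toStr (PySem.List.pyGetD values i 0)]
        let r := pvCarry digits st.1
        let piece :=
          if i == last then String.ofList (List.replicate r.2.toNat ']')
          else if r.2 ≠ 0 then
            String.ofList (List.replicate r.2.toNat ']') ++ ",\n" ++ String.ofList (List.replicate r.2.toNat '[')
          else ","
        (r.1, parts ++ [piece]))
      (List.replicate digits.length (0 : Int), [String.ofList (List.replicate digits.length '[')])
    PySem.Str.join "" res.2

-- ===== PRECONDITION & SPEC =====
-- Pre_ excludes only the inputs on which Python A raises ZeroDivisionError: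
-- a non-empty values list with a 0 in shape makes some suffix product 0 and '(i+1) % s' raises.
def Pre_format_by_shape_py (values : List Int) (shape : List Int) : Prop :=
  values = [] ∨ ∀ s ∈ shape, s ≠ 0
instance (values : List Int) (shape : List Int) : Decidable (Pre_format_by_shape_py values shape) := by
  unfold Pre_format_by_shape_py; infer_instance
def pvWitness_format_by_shape_py : List Int × List Int := ([3, 1, -4, 1, 5, 9], [2, 3])

def Spec_format_by_shape_py (values : List Int) (shape : List Int) (out : String) : Prop := out = format_by_shape_py_alt values shape
instance (values : List Int) (shape : List Int) (out : String) : Decidable (Spec_format_by_shape_py values shape out) := by unfold Spec_format_by_shape_py; infer_instance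

-- ===== CLAIM (what is proved, stated in full; the proofs are below) =====
def Claim_equal_format_by_shape_py : Prop := ∀ (values : List Int) (shape : List Int), Dom_format_by_shape_py values shape → Pre_format_by_shape_py values shape → Spec_format_by_shape_py values shape (format_by_shape_py values shape)

-- ===== LEMMAS AND PROOFS =====

-- suffix products: sp l = [prod l[0:], prod l[1:], …] — what A's in-place loop leaves in shape
def sp : List Int → List Int
  | [] => []
  | s :: t => (s :: t).prod :: sp t

@[simp] lemma length_sp (l : List Int) : (sp l).length = l.length := by
  induction l with
  | nil => rfl
  | cons s t ih => simp [sp, ih]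

lemma sp_getElem (l : List Int) (j : Nat) (hj : j < l.length) :
    (sp l)[j]'(by simpa using hj) = (l.drop j).prod := by
  induction l generalizing j with
  | nil => simp at hj
  | cons s t ih =>
    cases j with
    | zero => simp [sp]
    | succ j => simpa [sp] using ih j (by simpa using hj)

lemma sp_drop_last (l : List Int) : (sp l).drop (l.length - 1) = l.drop (l.length - 1) := by
  induction l with
  | nil => rfl
  | cons s t ih =>
    cases t with
    | nil => simp [sp]
    | cons b r =>
      have h1 : (s :: b :: r).length - 1 = ((b :: r).length - 1) + 1 := by simp
      rw [h1, show sp (s :: b :: r) = (s :: b :: r).prod :: sp (b :: r) from rfl,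
          List.drop_succ_cons, List.drop_succ_cons, ih]

-- mixed-radix digits of n, innermost dimension first
def natDigits : List Nat → Nat → List Nat
  | [], _ => []
  | d :: t, n => (n % d) :: natDigits t (n / d)

-- length of the longest chain of cumulative digit products dividing m
def gcnt : List Nat → Nat → Nat
  | [], _ => 0
  | d :: t, m => if m % d = 0 then gcnt t (m / d) + 1 else 0

-- nonempty prefix products
def ppNE : List Nat → List Nat
  | [] => []
  | d :: t => d :: (ppNE t).map (d * ·)

lemma natDigits_zero (D : List Nat) : natDigits D 0 = List.replicate D.length 0 := by
  induction D with
  | nil => rfl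
  | cons d t ih => simp [natDigits, ih, List.replicate_succ]

lemma ppNE_append_singleton (xs : List Nat) (a : Nat) :
    ppNE (xs ++ [a]) = ppNE xs ++ [xs.prod * a] := by
  induction xs with
  | nil => simp [ppNE]
  | cons d t ih => simp [ppNE, ih, List.map_append, mul_assoc]

lemma gcnt_eq_countP (D : List Nat) (m : Nat) (hm : 1 ≤ m) :
    gcnt D m = (ppNE D).countP (fun p => p ∣ m) := by
  induction D generalizing m with
  | nil => rfl
  | cons d t ih =>
    simp only [gcnt, ppNE, List.countP_cons, List.countP_map]
    by_cases hd : m % d = 0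
    · have hdvd : d ∣ m := Nat.dvd_of_mod_eq_zero hd
      have hd0 : d ≠ 0 := by rintro rfl; omega
      have hq : 1 ≤ m / d := Nat.one_le_div_iff (by omega) |>.mpr (Nat.le_of_dvd (by omega) hdvd)
      rw [if_pos hd, ih (m / d) hq]
      have h2 : ∀ p : Nat, (p ∣ m / d) = (d * p ∣ m) := fun p => by
        rw [Nat.dvd_div_iff_mul_dvd hdvd]
      simp [hdvd, h2, Function.comp_def]
    · rw [if_neg hd]
      have hnd : ¬ d ∣ m := fun h => hd (Nat.mod_eq_zero_of_dvd h)
      have hall : ∀ p ∈ ppNE t, ¬ (d * p ∣ m) := fun p _ h => hnd (dvd_trans (dvd_mul_right d p) h)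
      rw [List.countP_eq_zero.mpr (by simpa using hall)]
      simp [hnd]

lemma pvCarry_cons (d c : Int) (ds cs : List Int) :
    pvCarry (d :: ds) (c :: cs) =
      if c + 1 == d then (0 :: (pvCarry ds cs).1, (pvCarry ds cs).2 + 1)
      else ((c + 1) :: cs, 0) := rfl

-- one odometer step: from the digits of n it produces the digits of n+1,
-- and the rollover count is the chain count gcnt
lemma carry_step (D : List Nat) (hD : ∀ d ∈ D, 1 ≤ d) (n : Nat) :
    pvCarry (D.map Int.ofNat) ((natDigits D n).map Int.ofNat)
      = ((natDigits D (n + 1)).map Int.ofNat, ((gcnt D (n + 1) : Nat) : Int)) := by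
  induction D generalizing n with
  | nil => rfl
  | cons d t ih =>
    have hd : 1 ≤ d := hD d (by simp)
    have ht : ∀ x ∈ t, 1 ≤ x := fun x hx => hD x (by simp [hx])
    have hdm := Nat.div_add_mod n d
    rw [show natDigits (d :: t) n = (n % d) :: natDigits t (n / d) from rfl,
        show natDigits (d :: t) (n + 1) = ((n + 1) % d) :: natDigits t ((n + 1) / d) from rfl,
        List.map_cons, List.map_cons, List.map_cons, pvCarry_cons,
        show gcnt (d :: t) (n + 1) = if (n + 1) % d = 0 then gcnt t ((n + 1) / d) + 1 else 0 from rfl]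
    by_cases hroll : n % d + 1 = d
    · have hmul : n + 1 = d * (n / d + 1) := by rw [Nat.mul_succ]; omega
      have hdvd : d ∣ n + 1 := ⟨n / d + 1, hmul⟩
      have hmod : (n + 1) % d = 0 := Nat.mod_eq_zero_of_dvd hdvd
      have hdiv : (n + 1) / d = n / d + 1 := by rw [Nat.succ_div, if_pos hdvd]
      rw [if_pos (by simp only [Int.ofNat_eq_natCast, beq_iff_eq]; push_cast; omega), ih ht (n / d),
          hmod, hdiv, if_pos rfl]
      simp
    · have hlt : n % d < d := Nat.mod_lt _ (by omega)
      have hmod : (n + 1) % d = n % d + 1 := by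
        have h1 : n + 1 = (n % d + 1) + d * (n / d) := by omega
        rw [h1, Nat.add_mul_mod_self_left, Nat.mod_eq_of_lt (by omega)]
      have hndvd : ¬ d ∣ n + 1 := by
        intro h; rw [Nat.mod_eq_zero_of_dvd h] at hmod; omega
      have hdiv : (n + 1) / d = n / d := by simp [Nat.succ_div, hndvd]
      rw [if_neg (by simp only [Int.ofNat_eq_natCast, beq_iff_eq]; push_cast; omega), hmod, hdiv,
          if_neg (by omega)]
      simp

lemma natAbs_list_prod (l : List Int) : l.prod.natAbs = (l.map Int.natAbs).prod := by
  induction l with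
  | nil => rfl
  | cons a t ih => simp [Int.natAbs_mul, ih]

-- |suffix products of l| are the reversed prefix products of the reversed |digits|
lemma abs_sp (l : List Int) :
    (sp l).map Int.natAbs = (ppNE (l.reverse.map Int.natAbs)).reverse := by
  induction l with
  | nil => rfl
  | cons s t ih =>
    rw [show sp (s :: t) = (s :: t).prod :: sp t from rfl, List.map_cons, ih,
        List.reverse_cons, List.map_append, List.map_singleton, ppNE_append_singleton,
        List.reverse_append]
    simp [Nat.mul_comm]
    rw [Int.natAbs_mul, natAbs_list_prod]

lemma suffix_loop_aux (shape : List Int) (j : Nat) (hj : j + 1 ≤ shape.length) :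
    (PySem.List.pyRange ((j : Int) - 1) (-1) (-1)).foldl
        (fun s i => PySem.List.pySetD s i (PySem.List.pyGetD s i 0 * PySem.List.pyGetD s (i + 1) 0))
        (shape.take j ++ (sp shape).drop j)
      = sp shape := by
  induction j with
  | zero =>
    rw [PySem.List.pyRange_neg_one_eq_nil (by omega)]
    simp
  | succ j ih =>
    have hlt : j < shape.length := by omega
    have htake : (shape.take (j + 1)).length = j + 1 := by
      simp [List.length_take]; omega
    have hcast : ((j + 1 : Nat) : Int) - 1 = (j : Int) := by push_cast; ring
    rw [hcast, PySem.List.pyRange_neg_one_cons (by omega : (-1 : Int) < (j : Int)),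
        List.foldl_cons]
    have hstep :
        PySem.List.pySetD (shape.take (j + 1) ++ (sp shape).drop (j + 1)) (j : Int)
            (PySem.List.pyGetD (shape.take (j + 1) ++ (sp shape).drop (j + 1)) (j : Int) 0 *
             PySem.List.pyGetD (shape.take (j + 1) ++ (sp shape).drop (j + 1)) ((j : Int) + 1) 0)
          = shape.take j ++ (sp shape).drop j := by
      have hlen : (shape.take (j + 1) ++ (sp shape).drop (j + 1)).length = shape.length := by
        simp [List.length_take]; omega
      have hget1 : PySem.List.pyGetD (shape.take (j + 1) ++ (sp shape).drop (j + 1)) (j : Int) 0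
          = shape[j]'hlt := by
        rw [PySem.List.pyGetD_natCast, List.getD_eq_getElem _ _ (by omega : j < _),
            List.getElem_append_left (by omega : j < (shape.take (j + 1)).length),
            List.getElem_take]
      have hget2 : PySem.List.pyGetD (shape.take (j + 1) ++ (sp shape).drop (j + 1)) ((j : Int) + 1) 0
          = (sp shape)[j + 1]'(by simpa using hj) := by
        have hc : ((j : Int) + 1) = ((j + 1 : Nat) : Int) := by push_cast; ring
        rw [hc, PySem.List.pyGetD_natCast, List.getD_eq_getElem _ _ (by omega : j + 1 < _),
            List.getElem_append_right (by omega : (shape.take (j + 1)).length ≤ j + 1)]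
        simp [htake]
      rw [hget1, hget2, PySem.List.pySetD_natCast]
      have hval : shape[j]'hlt * (sp shape)[j + 1]'(by simpa using hj)
          = (sp shape)[j]'(by simpa using hlt) := by
        rw [sp_getElem _ _ (by omega), sp_getElem _ _ hlt,
            List.drop_eq_getElem_cons hlt, List.prod_cons]
      rw [hval, List.set_eq_take_append_cons_drop, if_pos (by rw [hlen]; omega)]
      have e1 : (shape.take (j + 1) ++ (sp shape).drop (j + 1)).take j = shape.take j := by
        rw [List.take_append_of_le_length (by omega), List.take_take]
        congr 1
        omega
      have e2 : (shape.take (j + 1) ++ (sp shape).drop (j + 1)).drop (j + 1) = (sp shape).drop (j + 1) := by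
        have e := List.drop_left (l₁ := shape.take (j + 1)) (l₂ := (sp shape).drop (j + 1))
        rwa [htake] at e
      rw [e1, e2, ← List.drop_eq_getElem_cons (by simpa using hlt)]
    rw [hstep, ih (by omega)]

-- A's in-place suffix-product loop computes sp
lemma suffix_loop_eq_sp (shape : List Int) :
    (PySem.List.pyRange ((PySem.List.len shape) - 2) (-1) (-1)).foldl
        (fun s i => PySem.List.pySetD s i (PySem.List.pyGetD s i 0 * PySem.List.pyGetD s (i + 1) 0)) shape
      = sp shape := by
  cases shape with
  | nil =>
    rw [PySem.List.pyRange_neg_one_eq_nil (by simp [PySem.List.len_eq])]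
    rfl
  | cons s t =>
    have h := suffix_loop_aux (s :: t) ((s :: t).length - 1) (by simp)
    rw [sp_drop_last, List.take_append_drop] at h
    have hc : (((s :: t).length - 1 : Nat) : Int) - 1 = PySem.List.len (s :: t) - 2 := by
      rw [PySem.List.len_eq]
      push_cast [List.length_cons]
      omega
    rwa [hc] at h

-- A's per-element modular scan over the suffix products equals the rollover-chain count
lemma cnt_eq_gcnt (shape : List Int) (k : Nat) :
    (sp shape).foldl (fun c s => if PySem.Int.mod ((k : Int) + 1) s == 0 then c + 1 else c) (0 : Int)
      = ((gcnt (shape.reverse.map Int.natAbs) (k + 1) : Nat) : Int) := by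
  rw [PySem.List.foldl_count_if (fun s => PySem.Int.mod ((k : Int) + 1) s == 0) (sp shape) 0,
      zero_add]
  congr 1
  have hc : ((k : Int) + 1) = ((k + 1 : Nat) : Int) := by push_cast; ring
  have hp : ∀ s : Int, (PySem.Int.mod ((k : Int) + 1) s == 0) = decide (s.natAbs ∣ (k + 1)) := by
    intro s
    have h1 : s ∣ ((k : Int) + 1) ↔ s.natAbs ∣ (k + 1) := by
      rw [hc, ← Int.natAbs_dvd_natAbs, Int.natAbs_natCast]
    rw [Bool.eq_iff_iff, beq_iff_eq, decide_eq_true_eq, PySem.Int.mod_eq_zero_iff_dvd]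
    exact h1
  rw [List.countP_congr (fun s _ => by rw [hp s]),
      show (fun s : Int => decide (s.natAbs ∣ (k + 1))) = ((fun p => decide (p ∣ (k + 1))) ∘ Int.natAbs) from rfl,
      ← List.countP_map, abs_sp, List.countP_reverse, ← gcnt_eq_countP _ _ (by omega)]

lemma chars_join_nil_append_singleton (L : List (List Char)) (c : List Char) :
    PySem.Chars.join [] (L ++ [c]) = PySem.Chars.join [] L ++ c := by
  induction L with
  | nil => simp [PySem.Chars.join_singleton, PySem.Chars.join_nil]
  | cons a rest ih =>
    cases rest with
    | nil => simp [PySem.Chars.join_singleton, PySem.Chars.join_cons_cons]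
    | cons b r =>
      rw [show a :: (b :: r) ++ [c] = a :: ((b :: r) ++ [c]) from rfl,
          show (b :: r) ++ [c] = b :: (r ++ [c]) from rfl,
          PySem.Chars.join_cons_cons, PySem.Chars.join_cons_cons,
          show b :: (r ++ [c]) = (b :: r) ++ [c] from rfl, ih]
      simp

lemma join_empty_append_singleton (P : List String) (x : String) :
    PySem.Str.join "" (P ++ [x]) = PySem.Str.join "" P ++ x := by
  simp only [PySem.Str.join]
  have h0 : ("" : String).toList = [] := rfl
  rw [h0, List.map_append, List.map_singleton, chars_join_nil_append_singleton,
      String.ofList_append, String.ofList_toList]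

-- the two main loops, run in step from index k with B's counters holding the digits of k
lemma main_loop (values shape : List Int) (hsh : ∀ s ∈ shape, s ≠ 0)
    (k : Nat) (acc : String) (parts : List String)
    (hk : k ≤ values.length) (hparts : PySem.Str.join "" parts = acc) :
    (PySem.List.pyRange (k : Int) (PySem.List.len values) 1).foldl
      (fun content i =>
        let cnt : Int := (sp shape).foldl (fun c s => if PySem.Int.mod (i + 1) s == 0 then c + 1 else c) 0
        let content := content ++ PySem.Int.toStr (PySem.List.pyGetD values i 0)
        if cnt ≠ 0 then
          let content := content ++ String.ofList (List.replicate cnt.toNat ']')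
          if i != PySem.List.len values - 1 then content ++ ",\n" ++ String.ofList (List.replicate cnt.toNat '[') else content
        else
          if i != PySem.List.len values - 1 then content ++ "," else content) acc
    = PySem.Str.join ""
      ((PySem.List.pyRange (k : Int) (PySem.List.len values) 1).foldl
        (fun st i =>
          let parts := st.2 ++ [PySem.Int.toStr (PySem.List.pyGetD values i 0)]
          let r := pvCarry ((shape.reverse.map Int.natAbs).map Int.ofNat) st.1
          let piece :=
            if i == PySem.List.len values - 1 then String.ofList (List.replicate r.2.toNat ']')
            else if r.2 ≠ 0 then
              String.ofList (List.replicate r.2.toNat ']') ++ ",\n" ++ String.ofList (List.replicate r.2.toNat '[')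
            else ","
          (r.1, parts ++ [piece]))
        ((natDigits (shape.reverse.map Int.natAbs) k).map Int.ofNat, parts)).2 := by
  have hD : ∀ d ∈ shape.reverse.map Int.natAbs, 1 ≤ d := by
    intro d hd
    obtain ⟨s, hs, rfl⟩ := List.mem_map.mp hd
    have hs' : s ≠ 0 := hsh s (List.mem_reverse.mp hs)
    omega
  revert k acc parts
  suffices H : ∀ (m k : Nat) (acc : String) (parts : List String),
      k ≤ values.length → values.length - k ≤ m → PySem.Str.join "" parts = acc →
      (PySem.List.pyRange (k : Int) (PySem.List.len values) 1).foldl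
        (fun content i =>
          let cnt : Int := (sp shape).foldl (fun c s => if PySem.Int.mod (i + 1) s == 0 then c + 1 else c) 0
          let content := content ++ PySem.Int.toStr (PySem.List.pyGetD values i 0)
          if cnt ≠ 0 then
            let content := content ++ String.ofList (List.replicate cnt.toNat ']')
            if i != PySem.List.len values - 1 then content ++ ",\n" ++ String.ofList (List.replicate cnt.toNat '[') else content
          else
            if i != PySem.List.len values - 1 then content ++ "," else content) acc
      = PySem.Str.join ""
        ((PySem.List.pyRange (k : Int) (PySem.List.len values) 1).foldl
          (fun st i =>
            let parts := st.2 ++ [PySem.Int.toStr (PySem.List.pyGetD values i 0)]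
            let r := pvCarry (((shape.reverse.map Int.natAbs)).map Int.ofNat) st.1
            let piece :=
              if i == PySem.List.len values - 1 then String.ofList (List.replicate r.2.toNat ']')
              else if r.2 ≠ 0 then
                String.ofList (List.replicate r.2.toNat ']') ++ ",\n" ++ String.ofList (List.replicate r.2.toNat '[')
              else ","
            (r.1, parts ++ [piece]))
          ((natDigits (shape.reverse.map Int.natAbs) k).map Int.ofNat, parts)).2 by
    intro k acc parts hk hparts
    exact H (values.length - k) k acc parts hk le_rfl hparts
  intro m
  induction m with
  | zero =>
    intro k acc parts hk hm hparts
    have hk' : k = values.length := by omega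
    rw [PySem.List.len_eq, PySem.List.pyRange_one_eq_nil (by exact_mod_cast le_of_eq hk'.symm)]
    simpa using hparts.symm
  | succ m ih =>
    intro k acc parts hk hm hparts
    simp only [PySem.List.len_eq, ne_eq, bne_iff_ne, beq_iff_eq] at ih ⊢
    by_cases hend : k = values.length
    · rw [PySem.List.pyRange_one_eq_nil (by exact_mod_cast le_of_eq hend.symm)]
      simpa using hparts.symm
    · have hlt : k < values.length := by omega
      rw [PySem.List.pyRange_one_cons (by exact_mod_cast hlt)]
      simp only [List.foldl_cons]
      have hcnt := cnt_eq_gcnt shape k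
      simp only [beq_iff_eq] at hcnt
      rw [hcnt, carry_step _ hD k]
      set D := shape.reverse.map Int.natAbs with hDdef
      set c := gcnt D (k + 1) with hcdef
      set ts := PySem.Int.toStr (PySem.List.pyGetD values (k : Int) 0) with htsdef
      have hcast : (k : Int) + 1 = ((k + 1 : Nat) : Int) := by push_cast; ring
      rw [hcast]
      by_cases hlast : (k : Int) = (values.length : Int) - 1 <;> by_cases hc0 : c = 0
      · simp only [hlast, hc0, Int.natCast_zero, not_true, if_false,
          if_true, Int.toNat_zero, List.replicate_zero]
        apply ih (k + 1) _ _ (by omega) (by omega)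
        rw [join_empty_append_singleton, join_empty_append_singleton, hparts]
        simp [show String.ofList ([] : List Char) = "" from rfl]
      · simp only [hlast, hc0, Int.natCast_eq_zero, not_true, not_false_iff,
          if_false, if_true, Int.toNat_natCast]
        apply ih (k + 1) _ _ (by omega) (by omega)
        rw [join_empty_append_singleton, join_empty_append_singleton, hparts]
        try simp [String.append_assoc]
      · simp only [hlast, hc0, Int.natCast_zero, not_false_iff,
          if_false, if_true, Int.toNat_zero, List.replicate_zero]
        apply ih (k + 1) _ _ (by omega) (by omega)
        rw [join_empty_append_singleton, join_empty_append_singleton, hparts]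
        try simp [String.append_assoc]
      · simp only [hlast, hc0, Int.natCast_eq_zero, not_false_iff,
          if_false, if_true, Int.toNat_natCast]
        apply ih (k + 1) _ _ (by omega) (by omega)
        rw [join_empty_append_singleton, join_empty_append_singleton, hparts]
        try simp [String.append_assoc]

-- ===== VERDICT (by name: the statement is the Claim_ definition above) =====
lemma join_singleton_str (x : String) : PySem.Str.join "" [x] = x := by
  have h := join_empty_append_singleton [] x
  rw [List.nil_append] at h
  rw [h, show PySem.Str.join "" [] = "" from rfl, String.empty_append]

theorem format_by_shape_py_spec : Claim_equal_format_by_shape_py := by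
  unfold Claim_equal_format_by_shape_py
  intro values shape _ hpre
  unfold Spec_format_by_shape_py format_by_shape_py format_by_shape_py_alt
  cases values with
  | nil => rfl
  | cons v vs =>
    have hsh : ∀ s ∈ shape, s ≠ 0 := by
      rcases hpre with h | h
      · exact absurd h (by simp)
      · exact h
    have htot : (PySem.List.len (v :: vs) == 0) = false := by
      simp only [PySem.List.len_eq]
      simp
      omega
    simp only [htot, Bool.false_eq_true, if_false]
    rw [suffix_loop_eq_sp]
    have hdig : shape.reverse.map (fun s => |s|) = (shape.reverse.map Int.natAbs).map Int.ofNat := by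
      rw [List.map_map]
      exact List.map_congr_left (fun s _ => by rw [Int.abs_eq_natAbs]; rfl)
    rw [hdig]
    have hlen1 : ((shape.reverse.map Int.natAbs).map Int.ofNat).length = shape.length := by simp
    have hinit : List.replicate ((shape.reverse.map Int.natAbs).map Int.ofNat).length (0 : Int)
        = (natDigits (shape.reverse.map Int.natAbs) 0).map Int.ofNat := by
      rw [natDigits_zero, List.map_replicate]
      simp
    rw [hinit]
    have hlen2 : (PySem.List.len shape).toNat = shape.length := by
      simp [PySem.List.len_eq]
    have hx : String.ofList (List.replicate ((shape.reverse.map Int.natAbs).map Int.ofNat).length '[')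
        = String.ofList (List.replicate (PySem.List.len shape).toNat '[') := by
      rw [hlen1, hlen2]
    exact main_loop (v :: vs) shape hsh 0 _ _ (by omega) ((join_singleton_str _).trans hx)
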